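-- pv_equiv track=rewrite | github.com/a-gavriel/Python-Games | Clases/Clases-Ejecicios/c14.py | digs_por_i
-- ===== SOURCE A (Python) =====
-- def digs_por_i(digs, indices,resultado, i):
--   if (len(digs) == i) or (indices == []):
--     return resultado
--   else:
--     if i == indices[0]:
--       actual = digs[i]
--       resultado.append(actual)
--       indices = indices[1:]
--     return digs_por_i(digs, indices,resultado, i+1 )
-- ===== SOURCE B (Python) =====
-- def digs_por_i(digs, indices, resultado, i):
--     n = len(digs)
--     for idx in indices:
--         if idx < i or idx >= n:
--             break
--         resultado.append(digs[idx])
--         i = idx + 1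
--     return resultado
-- ===== Notes on version B (the rewrite author's own statement) =====
-- stated objective: alternative
-- what changed: Instead of A's recursion that scans every position i up to len(digs) while slicing indices, B makes a single for-loop pass over the indices list itself, consuming the greedy prefix of indices that lie in the window [i, len(digs)) and breaking at the first one that does not; no recursion, no slicing, no scan over digs positions.
-- outside the precondition, e.g. on digs_por_i([1, 2], [-2], [], -5): A returns [1], B returns [1]
import Mathlib
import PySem

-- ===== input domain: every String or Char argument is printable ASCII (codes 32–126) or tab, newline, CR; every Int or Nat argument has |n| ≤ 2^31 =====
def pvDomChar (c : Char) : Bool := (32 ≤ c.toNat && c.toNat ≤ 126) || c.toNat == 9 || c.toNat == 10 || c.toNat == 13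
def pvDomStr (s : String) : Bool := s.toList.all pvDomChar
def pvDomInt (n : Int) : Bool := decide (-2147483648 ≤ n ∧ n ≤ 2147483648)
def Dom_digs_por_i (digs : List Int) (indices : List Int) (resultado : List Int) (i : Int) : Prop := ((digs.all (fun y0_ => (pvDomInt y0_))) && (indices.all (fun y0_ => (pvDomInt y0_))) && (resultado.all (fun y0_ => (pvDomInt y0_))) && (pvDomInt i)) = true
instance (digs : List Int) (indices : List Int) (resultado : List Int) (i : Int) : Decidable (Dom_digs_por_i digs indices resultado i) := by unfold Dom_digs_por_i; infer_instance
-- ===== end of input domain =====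

-- B replaces A's recursive scan of positions i..len(digs) by a single pass over the indices list
-- itself, consuming the greedy in-window prefix; both append to the passed-in resultado (same
-- in-place mutation as A); the equivalence proved is about the return value.

-- ===== PORT A =====
-- A's recursion made total with a fuel counter; under Pre_ the recursion depth is at most
-- (len(digs) - i), so the chosen fuel is never exhausted there.
def digsAGo (digs : List Int) (indices : List Int) (resultado : List Int) (i : Int) : Nat → List Int
  | 0 => resultado
  | fuel + 1 =>
    if (digs.length : Int) = i ∨ indices = [] then resultado
    else
      if i = indices.headD 0 then          -- indices[0]; indices ≠ [] in this branch
        -- actual = digs[i]; resultado.append(actual); indices = indices[1:]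
        digsAGo digs indices.tail (resultado ++ [PySem.List.pyGetD digs i 0]) (i + 1) fuel
      else
        digsAGo digs indices resultado (i + 1) fuel

def digs_por_i (digs : List Int) (indices : List Int) (resultado : List Int) (i : Int) : List Int :=
  digsAGo digs indices resultado i (((digs.length : Int) - i).toNat + 1)

-- ===== PORT B =====
-- B's for-loop over indices with break: structural recursion on the indices list; the lower
-- bound i is bumped past every consumed index.
def digsBTake (digs : List Int) (n : Int) : List Int → List Int → Int → List Int
  | [], resultado, _ => resultado
  | idx :: rest, resultado, i =>
    if idx < i ∨ n ≤ idx then resultado                                  -- break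
    else digsBTake digs n rest (resultado ++ [PySem.List.pyGetD digs idx 0]) (idx + 1)

def digs_por_i_alt (digs : List Int) (indices : List Int) (resultado : List Int) (i : Int) : List Int :=
  digsBTake digs (digs.length : Int) indices resultado i

-- ===== PRECONDITION & SPEC =====
-- Pre_ keeps the inputs on which Python A is guaranteed to return: -len(digs) <= i <= len(digs),
-- plus (any i with) indices empty, plus i below -len(digs) whose first index can never be matched
-- (so the scan just runs up to len(digs)). Excluded and still returning are only deep-negative i
-- whose first index does get matched, where A's value rests on negative-index wraparound and a
-- later match may raise IndexError; for i beyond len(digs) with nonempty indices A recurses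
-- unboundedly (RecursionError) or raises IndexError.
def Pre_digs_por_i (digs : List Int) (indices : List Int) (resultado : List Int) (i : Int) : Prop :=
  (-(digs.length : Int) ≤ i ∧ i ≤ (digs.length : Int)) ∨ indices = [] ∨
    (i < -(digs.length : Int) ∧ (indices.headD 0 < i ∨ (digs.length : Int) ≤ indices.headD 0))
instance (digs : List Int) (indices : List Int) (resultado : List Int) (i : Int) : Decidable (Pre_digs_por_i digs indices resultado i) := by unfold Pre_digs_por_i; infer_instance

def pvWitness_digs_por_i : List Int × List Int × List Int × Int := ([10, 20, 30], [0, 2], [], 0)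

def Spec_digs_por_i (digs : List Int) (indices : List Int) (resultado : List Int) (i : Int) (out : List Int) : Prop := out = digs_por_i_alt digs indices resultado i
instance (digs : List Int) (indices : List Int) (resultado : List Int) (i : Int) (out : List Int) : Decidable (Spec_digs_por_i digs indices resultado i out) := by unfold Spec_digs_por_i; infer_instance

-- ===== CLAIM (what is proved, stated in full; the proofs are below) =====
def Claim_equal_digs_por_i : Prop := ∀ (digs : List Int) (indices : List Int) (resultado : List Int) (i : Int), Dom_digs_por_i digs indices resultado i → Pre_digs_por_i digs indices resultado i → Spec_digs_por_i digs indices resultado i (digs_por_i digs indices resultado i)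

-- ===== LEMMAS AND PROOFS =====

-- With i ≤ len(digs) and enough fuel, A's position scan computes exactly B's greedy consumption
-- of the indices list.
theorem digsAGo_eq_digsBTake (digs : List Int) :
    ∀ (fuel : Nat) (indices resultado : List Int) (i : Int),
      i ≤ (digs.length : Int) → ((digs.length : Int) - i).toNat < fuel →
      digsAGo digs indices resultado i fuel =
        digsBTake digs (digs.length : Int) indices resultado i := by
  intro fuel
  induction fuel with
  | zero => intro indices resultado i _ h; omega
  | succ fuel ih =>
    intro indices resultado i hle hfuel
    cases indices with
    | nil => simp [digsAGo, digsBTake]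
    | cons idx rest =>
      by_cases hstop : (digs.length : Int) = i
      · have hbreak : idx < i ∨ (digs.length : Int) ≤ idx := by omega
        simp only [digsAGo, digsBTake]
        rw [if_pos (Or.inl hstop), if_pos hbreak]
      · have hcond : ¬ ((digs.length : Int) = i ∨ idx :: rest = []) := by
          rintro (h | h) <;> simp_all
        by_cases hmatch : i = (idx :: rest).headD 0
        · have hidx : idx = i := by simpa using hmatch.symm
          have hnobreak : ¬ (idx < i ∨ (digs.length : Int) ≤ idx) := by omega
          simp only [digsAGo, digsBTake]
          rw [if_neg hcond, if_pos hmatch, if_neg hnobreak]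
          have := ih rest (resultado ++ [PySem.List.pyGetD digs i 0]) (i + 1) (by omega) (by omega)
          simp only [List.tail_cons] at *
          rw [this, hidx]
        · have hne : i ≠ idx := by simpa using hmatch
          simp only [digsAGo]
          rw [if_neg hcond, if_neg hmatch]
          rw [ih (idx :: rest) resultado (i + 1) (by omega) (by omega)]
          -- the two B calls at i and i+1 agree: idx ≠ i, so both break or both consume idx
          by_cases hbr : idx < i ∨ (digs.length : Int) ≤ idx
          · have hbr' : idx < i + 1 ∨ (digs.length : Int) ≤ idx := by omega
            simp only [digsBTake]
            rw [if_pos hbr', if_pos hbr]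
          · have hbr' : ¬ (idx < i + 1 ∨ (digs.length : Int) ≤ idx) := by omega
            simp only [digsBTake]
            rw [if_neg hbr', if_neg hbr]

-- ===== VERDICT (by name: the statement is the Claim_ definition above) =====
theorem digs_por_i_spec : Claim_equal_digs_por_i := by
  intro digs indices resultado i _ hpre
  unfold Spec_digs_por_i digs_por_i digs_por_i_alt
  have hlen : (0 : Int) ≤ (digs.length : Int) := by positivity
  rcases hpre with ⟨_, hle⟩ | hnil | ⟨hlt, _⟩
  · exact digsAGo_eq_digsBTake digs _ indices resultado i hle (by omega)
  · subst hnil; simp [digsAGo, digsBTake]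
  · exact digsAGo_eq_digsBTake digs _ indices resultado i (by omega) (by omega)
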